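-- pv_equiv track=rewrite | github.com/wzr1998/plant-protection-report | SciVal analyse.py | list_strip
-- ===== SOURCE A (Python) =====
-- def list_strip(_list):
--     if _list[0] != 0 and _list[-1] != 0:
--         return _list
--     elif _list[0] == 0 and _list[-1] != 0:
--         _start = 0
--         for idx, num in enumerate(_list):
--             if num == 0:
--                 _start = idx + 1
--             else:
--                 break
--         return _list[_start:]
--     elif _list[0] != 0 and _list[-1] == 0:
--         _end = 0
--         for idx, num in enumerate(_list[::-1]):
--             if num == 0:
--                 _end = idx + 1
--             else:
--                 break
--         return _list[:-_end]
--     else: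
--         _start = 0
--         _end = 0
--         for idx, num in enumerate(_list):
--             if num == 0:
--                 _start = idx + 1
--             else:
--                 break
--         for idx, num in enumerate(_list[::-1]):
--             if num == 0:
--                 _end = idx + 1
--             else:
--                 break
--
--     return _list[_start:-_end]
-- ===== SOURCE B (Python) =====
-- def list_strip(_list):
--     # Strip leading/trailing zeros by dropping the zero prefix, once on the
--     # reversed list and once on the result, instead of A's four-way branch.
--     def drop_zeros(xs):
--         i = 0
--         while i < len(xs) and xs[i] == 0:
--             i += 1
--         return xs[i:]
--     return drop_zeros(drop_zeros(_list[::-1])[::-1])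
-- ===== Notes on version B (the rewrite author's own statement) =====
-- stated objective: simpler
-- what changed: Replaces A's four-way endpoint branch with three manual counting loops by a single drop-leading-zeros helper applied twice (once on the reversed list), with no index arithmetic or negative slicing.
import Mathlib
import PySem

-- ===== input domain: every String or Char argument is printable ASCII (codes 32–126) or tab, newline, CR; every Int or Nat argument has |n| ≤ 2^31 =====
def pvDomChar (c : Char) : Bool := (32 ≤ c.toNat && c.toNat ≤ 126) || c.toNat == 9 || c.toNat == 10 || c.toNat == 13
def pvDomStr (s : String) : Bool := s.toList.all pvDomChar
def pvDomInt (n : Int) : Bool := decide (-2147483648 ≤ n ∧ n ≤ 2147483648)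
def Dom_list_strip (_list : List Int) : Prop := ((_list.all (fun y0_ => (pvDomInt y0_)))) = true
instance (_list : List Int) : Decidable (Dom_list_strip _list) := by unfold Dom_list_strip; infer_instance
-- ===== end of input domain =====

-- B strips leading/trailing zeros by dropping the zero prefix twice (once on the
-- reversed list), replacing A's four-way endpoint branch; objective: simpler.

-- ===== PORT A =====
-- A's enumerate-with-break loops each leave _start/_end equal to the number of
-- leading zeros of the scanned list; ported as this structural recursion.
def pvCountLead : List Int → Nat
  | [] => 0
  | x :: xs => if x = 0 then pvCountLead xs + 1 else 0

def list_strip (_list : List Int) : List Int :=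
  -- _list[::-1] is _list.reverse (PySem.List.slice?_none_none_neg_one)
  match PySem.List.pyGet? _list 0, PySem.List.pyGet? _list (-1) with
  | some a, some b =>
      if a ≠ 0 ∧ b ≠ 0 then _list
      else if a = 0 ∧ b ≠ 0 then
        PySem.List.slice _list (some (pvCountLead _list : Int)) none
      else if a ≠ 0 ∧ b = 0 then
        PySem.List.slice _list none (some (-(pvCountLead _list.reverse : Int)))
      else
        PySem.List.slice _list (some (pvCountLead _list : Int))
          (some (-(pvCountLead _list.reverse : Int)))
  | _, _ => []   -- unreachable under Pre_: on [] Python's _list[0] raises IndexError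

-- ===== PORT B =====
-- B's index loop 'i = 0; while i < len(xs) and xs[i] == 0: i += 1'
def pvZeroPrefix : List Int → Nat
  | [] => 0
  | x :: xs => if x = 0 then pvZeroPrefix xs + 1 else 0

def pvDropZeros (xs : List Int) : List Int := xs.drop (pvZeroPrefix xs)  -- xs[i:]

def list_strip_alt (_list : List Int) : List Int :=
  pvDropZeros ((pvDropZeros _list.reverse).reverse)

-- ===== PRECONDITION & SPEC =====
-- Pre_ excludes only the empty list, on which A raises IndexError at its first element access.
def Pre_list_strip (_list : List Int) : Prop := _list ≠ []
instance (_list : List Int) : Decidable (Pre_list_strip _list) := by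
  unfold Pre_list_strip; infer_instance
def pvWitness_list_strip : List Int := [0, 3, 0]

def Spec_list_strip (_list : List Int) (out : List Int) : Prop := out = list_strip_alt _list
instance (_list : List Int) (out : List Int) : Decidable (Spec_list_strip _list out) := by
  unfold Spec_list_strip; infer_instance

-- ===== CLAIM (what is proved, stated in full; the proofs are below) =====
def Claim_equal_list_strip : Prop :=
  ∀ (_list : List Int), Dom_list_strip _list → Pre_list_strip _list →
    Spec_list_strip _list (list_strip _list)

-- ===== LEMMAS AND PROOFS =====

theorem pvZeroPrefix_eq (xs : List Int) : pvZeroPrefix xs = pvCountLead xs := by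
  induction xs with
  | nil => rfl
  | cons x xs ih => simp only [pvZeroPrefix, pvCountLead, ih]

theorem pvCountLead_le (xs : List Int) : pvCountLead xs ≤ xs.length := by
  induction xs with
  | nil => simp [pvCountLead]
  | cons x xs ih =>
    simp only [pvCountLead, List.length_cons]
    split_ifs with h <;> omega

theorem pvCountLead_take (l : List Int) (m : Nat) :
    pvCountLead (l.take m) = min m (pvCountLead l) := by
  induction l generalizing m with
  | nil => simp [pvCountLead]
  | cons x xs ih =>
    cases m with
    | zero => simp [pvCountLead]
    | succ m =>
      simp only [List.take_succ_cons, pvCountLead]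
      split_ifs with h
      · rw [ih]; omega
      · simp

theorem pvCountLead_eq_len (xs : List Int) (h : pvCountLead xs = xs.length) :
    ∀ z ∈ xs, z = 0 := by
  induction xs with
  | nil => simp
  | cons x xs ih =>
    intro z hz
    simp only [pvCountLead, List.length_cons] at h
    by_cases hx : x = 0
    · rw [if_pos hx] at h
      rcases List.mem_cons.1 hz with rfl | hz'
      · exact hx
      · exact ih (by omega) z hz'
    · rw [if_neg hx] at h
      have := pvCountLead_le xs
      omega

-- B's value in closed form: take off the e trailing positions, then drop the
-- (clamped) s leading ones, where s/e are the leading-zero counts of l / l.reverse.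
theorem alt_closed (l : List Int) :
    list_strip_alt l =
      (l.take (l.length - pvCountLead l.reverse)).drop
        (min (l.length - pvCountLead l.reverse) (pvCountLead l)) := by
  unfold list_strip_alt pvDropZeros
  simp only [pvZeroPrefix_eq, List.drop_reverse, List.reverse_reverse, pvCountLead_take]

theorem list_strip_spec_aux (l : List Int) (hne : l ≠ []) :
    list_strip l = list_strip_alt l := by
  rcases hl' : l with _ | ⟨x, xs⟩
  · exact absurd hl' hne
  rw [← hl']
  have hl : l = x :: xs := hl'
  have hrne : l.reverse ≠ [] := by simp [hl]
  rcases hr : l.reverse with _ | ⟨y, ys⟩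
  · exact absurd hr hrne
  have hget0 : PySem.List.pyGet? l 0 = some x := by
    simp [hl, PySem.List.pyGet?, PySem.List.pyIdx?]
  have hget1 : PySem.List.pyGet? l (-1) = some y := by
    rw [PySem.List.pyGet?_neg_one, List.getLast?_eq_head?_reverse, hr]; rfl
  have hsle : pvCountLead l ≤ l.length := pvCountLead_le l
  have hele : pvCountLead l.reverse ≤ l.length := by
    simpa using pvCountLead_le l.reverse
  rw [alt_closed]
  unfold list_strip
  rw [hget0, hget1]
  by_cases hx : x = 0 <;> by_cases hy : y = 0
  · -- both ends zero: s ≥ 1, e ≥ 1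
    have hs1 : 1 ≤ pvCountLead l := by rw [hl]; simp [pvCountLead, hx]
    have he1 : 1 ≤ pvCountLead l.reverse := by rw [hr]; simp [pvCountLead, hy]
    simp only [hx, hy, ne_eq, not_true_eq_false, and_false, if_false,
      not_false_eq_true, and_true]
    rw [show PySem.List.slice l (some (pvCountLead l : Int))
          (some (-(pvCountLead l.reverse : Int))) =
        (l.drop (PySem.List.clampIdx l.length (pvCountLead l : Int))).take
          (PySem.List.clampIdx l.length (-(pvCountLead l.reverse : Int)) -
           PySem.List.clampIdx l.length (pvCountLead l : Int)) from rfl]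
    rw [PySem.List.clampIdx_neg_natCast l.length _ (by omega),
        PySem.List.clampIdx_natCast, min_eq_left hsle, List.drop_take]
    rcases le_or_gt (pvCountLead l) (l.length - pvCountLead l.reverse) with hc | hc
    · rw [min_eq_right hc]
    · rw [min_eq_left (by omega : l.length - pvCountLead l.reverse ≤ pvCountLead l)]
      rw [show l.length - pvCountLead l.reverse - pvCountLead l = 0 by omega,
          show l.length - pvCountLead l.reverse - (l.length - pvCountLead l.reverse) = 0
            by omega]
      simp
  · -- head zero, last nonzero: e = 0, s < length
    have hs1 : 1 ≤ pvCountLead l := by rw [hl]; simp [pvCountLead, hx]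
    have he0 : pvCountLead l.reverse = 0 := by rw [hr]; simp [pvCountLead, hy]
    have hslt : pvCountLead l < l.length := by
      rcases lt_or_eq_of_le hsle with h | h
      · exact h
      · exfalso
        have hall := pvCountLead_eq_len l h
        have hmem : y ∈ l := by
          have : y ∈ l.reverse := by rw [hr]; simp
          simpa using this
        exact hy (hall y hmem)
    simp only [hx, hy, ne_eq, not_true_eq_false, false_and, if_false,
      not_false_eq_true, and_true, if_true]
    rw [PySem.List.slice_some_none, PySem.List.clampIdx_natCast,
        min_eq_left hsle, he0, Nat.sub_zero, List.take_length,
        min_eq_right (le_of_lt hslt)]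
  · -- head nonzero, last zero: s = 0, e ≥ 1
    have hs0 : pvCountLead l = 0 := by rw [hl]; simp [pvCountLead, hx]
    have he1 : 1 ≤ pvCountLead l.reverse := by rw [hr]; simp [pvCountLead, hy]
    simp only [hx, hy, ne_eq, not_true_eq_false, and_false, if_false,
      not_false_eq_true, true_and]
    rw [show PySem.List.slice l none (some (-(pvCountLead l.reverse : Int))) =
        (l.drop 0).take (PySem.List.clampIdx l.length (-(pvCountLead l.reverse : Int)) - 0)
        from rfl]
    rw [PySem.List.clampIdx_neg_natCast l.length _ (by omega), hs0]
    simp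
  · -- both ends nonzero: s = 0, e = 0
    have hs0 : pvCountLead l = 0 := by rw [hl]; simp [pvCountLead, hx]
    have he0 : pvCountLead l.reverse = 0 := by rw [hr]; simp [pvCountLead, hy]
    simp only [hx, hy, ne_eq, not_false_eq_true, and_self, if_true]

    rw [hs0, he0]
    simp

-- ===== VERDICT (by name: the statement is the Claim_ definition above) =====
theorem list_strip_spec : Claim_equal_list_strip := by
  intro l _ hpre
  exact list_strip_spec_aux l hpre
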